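-- pv_equiv track=rewrite | github.com/b-long/opentdf-python-sdk | otdf-python-proto/tests/test_generate_connect_proto.py | _parse_tag
-- ===== SOURCE A (Python) =====
-- def _parse_tag(argv: list[str]) -> str | None:
--     """Run just the tag-parsing block from main() against a given argv."""
--     git_tag = None
--     for i, arg in enumerate(argv[1:], 1):
--         if arg.startswith("--tag="):
--             git_tag = arg.split("=", 1)[1]
--         elif arg == "--tag" and i + 1 < len(argv):
--             git_tag = argv[i + 1]
--     return git_tag
-- ===== SOURCE B (Python) =====
-- def _parse_tag(argv: list[str]) -> str | None:
--     """Scan argv from the end; the first match found (= last match of a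
--     forward scan) is returned immediately, no accumulator needed."""
--     for i in range(len(argv) - 1, 0, -1):
--         arg = argv[i]
--         if arg.startswith("--tag="):
--             return arg.split("=", 1)[1]
--         if arg == "--tag" and i + 1 < len(argv):
--             return argv[i + 1]
--     return None
-- ===== Notes on version B (the rewrite author's own statement) =====
-- stated objective: alternative
-- what changed: B scans argv backward from the last element and returns at the first matching position (last-match-wins becomes first-match-backward with early exit), eliminating A's git_tag accumulator and the full forward pass.
import Mathlib
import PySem

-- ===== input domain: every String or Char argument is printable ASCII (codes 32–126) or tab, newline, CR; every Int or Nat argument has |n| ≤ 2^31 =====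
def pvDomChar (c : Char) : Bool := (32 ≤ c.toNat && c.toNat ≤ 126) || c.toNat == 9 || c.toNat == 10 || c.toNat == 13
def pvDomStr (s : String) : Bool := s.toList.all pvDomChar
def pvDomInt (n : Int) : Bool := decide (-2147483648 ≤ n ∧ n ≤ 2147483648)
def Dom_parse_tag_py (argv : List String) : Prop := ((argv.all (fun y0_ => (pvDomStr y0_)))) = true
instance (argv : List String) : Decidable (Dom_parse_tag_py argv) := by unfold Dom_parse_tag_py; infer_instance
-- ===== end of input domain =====

-- B scans argv backward with an early return instead of A's forward pass with a
-- last-match-wins accumulator; same O(n) cost, no accumulator (objective: alternative).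

-- ===== PORT A =====
-- In both ports, Python's arg.split("=",1)[1] (resp. argv[i+1]) is ported as the
-- pyGet? Option itself; it is `some _` in every reachable case (startswith "--tag="
-- guarantees a "=" split; the elif guard guarantees i+1 in range), so this is exact.
def parse_tag_py (argv : List String) : Option String :=
  (PySem.List.enumerate (PySem.List.slice argv (some 1) none) 1).foldl
    (fun git_tag p =>
      if PySem.Str.startswith p.2 "--tag=" then
        PySem.List.pyGet? ((PySem.Str.splitMax? p.2 "=" 1).getD []) 1
      else if p.2 == "--tag" && decide (p.1 + 1 < (argv.length : Int)) then
        PySem.List.pyGet? argv (p.1 + 1)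
      else git_tag) none

-- ===== PORT B =====
-- for i in range(len(argv)-1, 0, -1): the argument `j+1` is the current index i;
-- argv.getD i "" is argv[i], always in range on this countdown.
def altGo (argv : List String) : Nat → Option String
  | 0 => none
  | j+1 =>
    let arg := argv.getD (j+1) ""
    if PySem.Str.startswith arg "--tag=" then
      PySem.List.pyGet? ((PySem.Str.splitMax? arg "=" 1).getD []) 1
    else if arg == "--tag" && decide (((j:Int)+1) + 1 < (argv.length : Int)) then
      PySem.List.pyGet? argv (((j:Int)+1) + 1)
    else altGo argv j

def parse_tag_py_alt (argv : List String) : Option String := altGo argv (argv.length - 1)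

-- ===== PRECONDITION & SPEC =====
def Spec_parse_tag_py (argv : List String) (out : Option String) : Prop := out = parse_tag_py_alt argv
instance (argv : List String) (out : Option String) : Decidable (Spec_parse_tag_py argv out) := by unfold Spec_parse_tag_py; infer_instance

-- ===== CLAIM (what is proved, stated in full; the proofs are below) =====
def Claim_equal_parse_tag_py : Prop := ∀ (argv : List String), Dom_parse_tag_py argv → Spec_parse_tag_py argv (parse_tag_py argv)

-- ===== LEMMAS AND PROOFS =====

-- the per-position match: `some v` if index/arg p matches (with the value set there), `none` if not
def pvStep (argv : List String) (p : Int × String) : Option (Option String) :=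
  if PySem.Str.startswith p.2 "--tag=" then
    some (PySem.List.pyGet? ((PySem.Str.splitMax? p.2 "=" 1).getD []) 1)
  else if p.2 == "--tag" && decide (p.1 + 1 < (argv.length : Int)) then
    some (PySem.List.pyGet? argv (p.1 + 1))
  else none

theorem foldl_getD_eq_findSome {α β : Type} (g : α → Option β) :
    ∀ (l : List α) (init : β),
      l.foldl (fun acc p => (g p).getD acc) init = (l.reverse.findSome? g).getD init := by
  intro l
  induction l with
  | nil => intro init; rfl
  | cons x xs ih =>
    intro init
    simp only [List.foldl_cons, List.reverse_cons, List.findSome?_append, ih]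
    cases h : xs.reverse.findSome? g with
    | some b => simp
    | none => cases hx : g x <;> simp [List.findSome?, hx]

theorem parse_tag_py_eq_findSome (argv : List String) :
    parse_tag_py argv =
      ((PySem.List.enumerate (argv.drop 1) 1).reverse.findSome? (pvStep argv)).getD none := by
  unfold parse_tag_py
  rw [PySem.List.slice_from _ (by norm_num : (0:Int) ≤ 1)]
  rw [show ((1:Int).toNat) = 1 from rfl]
  rw [show (fun (git_tag : Option String) (p : Int × String) =>
      if PySem.Str.startswith p.2 "--tag=" then
        PySem.List.pyGet? ((PySem.Str.splitMax? p.2 "=" 1).getD []) 1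
      else if p.2 == "--tag" && decide (p.1 + 1 < (argv.length : Int)) then
        PySem.List.pyGet? argv (p.1 + 1)
      else git_tag) =
      (fun acc p => (pvStep argv p).getD acc) from by
    funext acc p
    unfold pvStep
    split_ifs <;> rfl]
  exact foldl_getD_eq_findSome _ _ _

theorem altGo_eq_findSome (argv : List String) :
    ∀ n, n < argv.length →
      altGo argv n =
        (((PySem.List.enumerate (argv.drop 1) 1).take n).reverse.findSome? (pvStep argv)).getD none := by
  intro n
  induction n with
  | zero => intro _; rfl
  | succ j ih =>
    intro hn
    have hj1 : j + 1 < argv.length := hn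
    have hE : j < (PySem.List.enumerate (argv.drop 1) 1).length := by
      rw [PySem.List.length_enumerate, List.length_drop]; omega
    have hdj : j < (argv.drop 1).length := by rw [List.length_drop]; omega
    have htake : (PySem.List.enumerate (argv.drop 1) 1).take (j+1) =
        (PySem.List.enumerate (argv.drop 1) 1).take j ++
          [(PySem.List.enumerate (argv.drop 1) 1)[j]] := by
      rw [List.take_add_one, List.getElem?_eq_getElem hE]; rfl
    have hgetE : (PySem.List.enumerate (argv.drop 1) 1)[j] = ((j:Int) + 1, argv[j+1]'hj1) := by
      rw [PySem.List.getElem_enumerate (h := hE)]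
      refine Prod.ext ?_ ?_
      · show (1:Int) + (j:Int) = (j:Int) + 1; ring
      · show (argv.drop 1)[j]'hdj = argv[j+1]'hj1
        rw [List.getElem_drop]
        congr 1
        omega
    have harg : argv.getD (j+1) "" = argv[j+1]'hj1 := by
      rw [List.getD_eq_getElem?_getD, List.getElem?_eq_getElem hj1]; rfl
    rw [htake, List.reverse_append, List.reverse_singleton, List.singleton_append,
        List.findSome?_cons, hgetE]
    have hps : pvStep argv ((j:Int) + 1, argv[j+1]'hj1) =
        (if PySem.Str.startswith (argv[j+1]'hj1) "--tag=" then
          some (PySem.List.pyGet? ((PySem.Str.splitMax? (argv[j+1]'hj1) "=" 1).getD []) 1)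
        else if (argv[j+1]'hj1) == "--tag" && decide (((j:Int)+1) + 1 < (argv.length : Int)) then
          some (PySem.List.pyGet? argv (((j:Int)+1) + 1))
        else none) := rfl
    rw [hps]
    show (if PySem.Str.startswith (argv.getD (j+1) "") "--tag=" then
        PySem.List.pyGet? ((PySem.Str.splitMax? (argv.getD (j+1) "") "=" 1).getD []) 1
      else if (argv.getD (j+1) "") == "--tag" && decide (((j:Int)+1) + 1 < (argv.length : Int)) then
        PySem.List.pyGet? argv (((j:Int)+1) + 1)
      else altGo argv j) = _
    rw [harg]
    by_cases h1 : PySem.Str.startswith (argv[j+1]'hj1) "--tag=" = true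
    · rw [if_pos h1, if_pos h1]; rfl
    · rw [if_neg h1, if_neg h1]
      by_cases h2 : ((argv[j+1]'hj1) == "--tag" && decide (((j:Int)+1) + 1 < (argv.length : Int))) = true
      · rw [if_pos h2, if_pos h2]; rfl
      · rw [if_neg h2, if_neg h2]
        exact ih (by omega)

-- ===== VERDICT (by name: the statement is the Claim_ definition above) =====
theorem parse_tag_py_spec : Claim_equal_parse_tag_py := by
  intro argv _
  show parse_tag_py argv = parse_tag_py_alt argv
  cases argv with
  | nil => rfl
  | cons a as =>
    rw [parse_tag_py_eq_findSome]
    unfold parse_tag_py_alt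
    rw [altGo_eq_findSome _ _ (by simp)]
    congr 2
    rw [List.take_of_length_le
      (le_of_eq (by rw [PySem.List.length_enumerate, List.length_drop]))]
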